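-- pv_equiv track=rewrite | github.com/maoulee/RelationRior | src/subgraph_kgqa/skill_mining/k_run_analyzer.py | _set_diff
-- ===== SOURCE A (Python) =====
-- from typing import Any, Dict, List, Optional, Sequence, Set, Tuple
--
-- def _set_diff(sets_a: Sequence[Set[str]], sets_b: Sequence[Set[str]]) -> Set[str]:
--     """Return elements present in any of sets_a but absent from all of sets_b."""
--     union_a: Set[str] = set()
--     for s in sets_a:
--         union_a |= s
--     intersection_b: Set[str] = set()
--     initialized = False
--     for s in sets_b:
--         if not initialized:
--             intersection_b = set(s)
--             initialized = True
--         else: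
--             intersection_b &= s
--     if not initialized:
--         return union_a
--     return union_a - intersection_b
-- ===== SOURCE B (Python) =====
-- from typing import Sequence, Set
--
-- def _set_diff(sets_a: Sequence[Set[str]], sets_b: Sequence[Set[str]]) -> Set[str]:
--     """Return elements present in any of sets_a but absent from the intersection of sets_b."""
--     union_a: Set[str] = set()
--     for s in sets_a:
--         union_a |= s
--     # keep x unless sets_b is nonempty and x lies in every set of sets_b
--     return {x for x in union_a if not sets_b or any(x not in s for s in sets_b)}
-- ===== Notes on version B (the rewrite author's own statement) =====
-- stated objective: simpler
-- what changed: B keeps no intersection set: after the same union pass it filters each candidate directly by probing its membership across sets_b (a set comprehension), instead of A's flag-driven loop that materialises the intersection of sets_b and then subtracts it.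
import Mathlib
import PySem

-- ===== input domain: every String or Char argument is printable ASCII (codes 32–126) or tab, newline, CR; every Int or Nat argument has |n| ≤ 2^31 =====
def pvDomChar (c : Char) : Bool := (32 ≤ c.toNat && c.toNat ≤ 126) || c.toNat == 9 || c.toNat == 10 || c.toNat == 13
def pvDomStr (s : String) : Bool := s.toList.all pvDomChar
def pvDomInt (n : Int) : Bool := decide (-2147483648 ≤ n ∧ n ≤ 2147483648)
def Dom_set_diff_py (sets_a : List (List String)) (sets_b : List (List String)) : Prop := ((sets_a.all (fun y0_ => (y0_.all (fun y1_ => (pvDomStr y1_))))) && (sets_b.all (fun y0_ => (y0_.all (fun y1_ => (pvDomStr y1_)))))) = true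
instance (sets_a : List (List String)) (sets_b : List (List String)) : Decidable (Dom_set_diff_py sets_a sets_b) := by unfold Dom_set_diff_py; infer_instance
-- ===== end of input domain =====

-- B replaces A's flag-driven intersection loop + set subtraction by a direct membership
-- filter of the union (simpler decomposition; return value only, no mutation involved).

-- ===== PORT A =====
def set_diff_py (sets_a : List (List String)) (sets_b : List (List String)) : List String :=
  -- union_a = set(); for s in sets_a: union_a |= s
  let union_a : PySem.Set String := sets_a.foldl (fun u s => PySem.Set.update u s) PySem.Set.empty
  -- intersection_b = set(); initialized = False; for s in sets_b: …
  let st : PySem.Set String × Bool :=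
    sets_b.foldl (fun p s => if p.2 = false then (PySem.Set.ofList s, true) else (PySem.Set.inter p.1 s, true)) (PySem.Set.empty, false)
  if st.2 = false then union_a else PySem.Set.diff union_a st.1

-- ===== PORT B =====
def set_diff_py_alt (sets_a : List (List String)) (sets_b : List (List String)) : List String :=
  let union_a : PySem.Set String := sets_a.foldl (fun u s => PySem.Set.update u s) PySem.Set.empty
  -- {x for x in union_a if not sets_b or any(x not in s for s in sets_b)}
  union_a.filter (fun x => sets_b.isEmpty || sets_b.any (fun s => !(PySem.Set.contains s x)))

-- ===== PRECONDITION & SPEC =====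
def Spec_set_diff_py (sets_a : List (List String)) (sets_b : List (List String)) (out : List String) : Prop := out = set_diff_py_alt sets_a sets_b
instance (sets_a : List (List String)) (sets_b : List (List String)) (out : List String) : Decidable (Spec_set_diff_py sets_a sets_b out) := by unfold Spec_set_diff_py; infer_instance

-- ===== CLAIM (what is proved, stated in full; the proofs are below) =====
def Claim_equal_set_diff_py : Prop := ∀ (sets_a : List (List String)) (sets_b : List (List String)), Dom_set_diff_py sets_a sets_b → Spec_set_diff_py sets_a sets_b (set_diff_py sets_a sets_b)

-- ===== LEMMAS AND PROOFS =====

-- once initialized, A's loop is a plain foldl of intersections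
theorem foldl_init_true (rest : List (List String)) (c : PySem.Set String) :
    rest.foldl (fun (p : PySem.Set String × Bool) s => if p.2 = false then (PySem.Set.ofList s, true) else (PySem.Set.inter p.1 s, true)) (c, true)
      = (rest.foldl (fun c s => PySem.Set.inter c s) c, true) := by
  induction rest generalizing c with
  | nil => rfl
  | cons s rest ih => simp [List.foldl_cons, ih]

-- membership in the folded intersection
theorem mem_foldl_inter (rest : List (List String)) (c : PySem.Set String) (x : String) :
    x ∈ rest.foldl (fun c s => PySem.Set.inter c s) c ↔ x ∈ c ∧ ∀ s ∈ rest, x ∈ s := by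
  induction rest generalizing c with
  | nil => simp
  | cons s rest ih =>
    simp only [List.foldl_cons, ih, PySem.Set.mem_inter, List.forall_mem_cons]
    tauto

theorem diff_eq_filter (s t : PySem.Set String) :
    PySem.Set.diff s t = s.filter (fun x => !(PySem.Set.contains t x)) := by
  simp [PySem.Set.diff]

-- ===== VERDICT (by name: the statement is the Claim_ definition above) =====
theorem set_diff_py_spec : Claim_equal_set_diff_py := by
  intro sets_a sets_b _
  unfold Spec_set_diff_py set_diff_py set_diff_py_alt
  cases sets_b with
  | nil =>
    simp [List.filter_true]
  | cons s0 rest =>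
    have hfold : (s0 :: rest).foldl (fun (p : PySem.Set String × Bool) s => if p.2 = false then (PySem.Set.ofList s, true) else (PySem.Set.inter p.1 s, true)) (PySem.Set.empty, false)
        = (rest.foldl (fun c s => PySem.Set.inter c s) (PySem.Set.ofList s0), true) := by
      simp only [List.foldl_cons]
      simp only [if_true]
      rw [foldl_init_true]
    rw [hfold]
    simp only [Bool.true_eq_false, if_false, diff_eq_filter]
    apply List.filter_congr
    intro x _
    have hC : x ∈ rest.foldl (fun c s => PySem.Set.inter c s) (PySem.Set.ofList s0) ↔ ∀ s ∈ s0 :: rest, x ∈ s := by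
      rw [mem_foldl_inter]
      simp [PySem.Set.mem_ofList]
    simp only [List.isEmpty_cons, Bool.false_or, PySem.Set.contains_eq_listContains, List.contains_eq_mem]
    rw [Bool.eq_iff_iff]
    simp only [decide_eq_false_iff_not, hC, List.any_eq_true, Bool.not_eq_eq_eq_not, Bool.not_true, decide_eq_false_iff_not]
    push Not
    rfl
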